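-- pv_equiv track=rewrite | github.com/Nuppiz/Ristinolla | Board.py | check_rows_open
-- ===== SOURCE A (Python) =====
-- def check_rows_open(board, character, win_score):
--     final_score = 0
--
--     for row in range(0,len(board)):
--         score = 0
--         max_score = 0
--         open_len = 0
--
--         for column in range(0,len(board[0])):
--             if board[row][column] == character:
--                 score +=1
--                 open_len +=1
--                 if score > max_score:
--                     max_score = score
--             elif board[row][column] == "-":
--                 score = 0
--                 open_len +=1
--             else:
--                 score = 0
--                 open_len = 0
--                 max_score = 0
--
--             if open_len >= win_score and score > max_score:
--                 max_score = score
--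
--             if open_len >= win_score and max_score > final_score:
--                 final_score = max_score
--
--     return final_score
-- ===== SOURCE B (Python) =====
-- def check_rows_open(board, character, win_score):
--     # Split each row into maximal "open" segments (cells equal to character or '-'),
--     # then score each long-enough segment by its longest run of character.
--     if not board:
--         return 0
--     width = len(board[0])
--     best = 0
--     for row in board:
--         segments = []
--         cur = []
--         for i in range(width):
--             cell = row[i]
--             if cell == character or cell == "-":
--                 cur.append(cell)
--             else:
--                 segments.append(cur)
--                 cur = []
--         segments.append(cur)
--         for seg in segments:
--             if len(seg) >= win_score:
--                 run = 0
--                 mx = 0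
--                 for cell in seg:
--                     if cell == character:
--                         run += 1
--                         if run > mx:
--                             mx = run
--                     else:
--                         run = 0
--                 if mx > best:
--                     best = mx
--     return best
-- ===== Notes on version B (the rewrite author's own statement) =====
-- stated objective: alternative
-- what changed: B replaces A's single stateful scan with four intertwined counters per row by a two-phase decomposition: split each row into maximal open segments (character or '-'), then score each segment of length >= win_score by its longest run of character.
import Mathlib
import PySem

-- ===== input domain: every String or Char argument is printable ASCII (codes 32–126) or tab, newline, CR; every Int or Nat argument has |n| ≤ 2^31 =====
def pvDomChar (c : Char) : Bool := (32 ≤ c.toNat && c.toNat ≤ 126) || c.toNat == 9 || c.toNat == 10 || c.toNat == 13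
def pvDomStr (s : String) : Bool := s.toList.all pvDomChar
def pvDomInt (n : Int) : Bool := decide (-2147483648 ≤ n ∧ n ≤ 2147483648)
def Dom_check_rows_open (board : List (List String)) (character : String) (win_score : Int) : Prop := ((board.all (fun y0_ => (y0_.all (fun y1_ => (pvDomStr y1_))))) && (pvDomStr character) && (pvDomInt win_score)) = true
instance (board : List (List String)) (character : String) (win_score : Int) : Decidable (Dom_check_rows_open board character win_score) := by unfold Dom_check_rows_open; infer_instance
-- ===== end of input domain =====

-- B restructures A's one stateful per-row scan (four intertwined counters) into an
-- explicit split-into-open-segments pass followed by a longest-run scan per segment;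
-- same cost, proved to return the same value on all boards whose rows are long enough.

-- ===== PORT A =====
-- the inner-loop body of A, step for step (branch order preserved)
def pvStepA (character : String) (win_score : Int) (s : Int × Int × Int × Int) (cell : String) : Int × Int × Int × Int :=
  let t : Int × Int × Int :=
    if cell == character then
      (s.1 + 1, if s.1 + 1 > s.2.1 then s.1 + 1 else s.2.1, s.2.2.1 + 1)
    else if cell == "-" then
      (0, s.2.1, s.2.2.1 + 1)
    else
      (0, 0, 0)
  let m2 := if t.2.2 ≥ win_score ∧ t.1 > t.2.1 then t.1 else t.2.1
  let f2 := if t.2.2 ≥ win_score ∧ m2 > s.2.2.2 then m2 else s.2.2.2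
  (t.1, m2, t.2.2, f2)

def check_rows_open (board : List (List String)) (character : String) (win_score : Int) : Int :=
  ((PySem.List.pyRange 0 (board.length : Int) 1).foldl (fun final_score row =>
    (((PySem.List.pyRange 0 ((PySem.List.pyGetD board 0 []).length : Int) 1).foldl
        (fun s column => pvStepA character win_score s (PySem.List.pyGetD (PySem.List.pyGetD board row []) column ""))
        (0, 0, 0, final_score)).2.2.2)) 0)

-- ===== PORT B =====
-- phase 1 step: split the row into maximal open segments (accumulator: closed segments, current segment)
def pvSegStep (character : String) (p : List (List String) × List String) (cell : String) : List (List String) × List String :=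
  if cell == character || cell == "-" then (p.1, p.2 ++ [cell]) else (p.1 ++ [p.2], [])

-- phase 2 step: longest consecutive run of character within a segment (accumulator: run, max)
def pvRunStep (character : String) (q : Int × Int) (cell : String) : Int × Int :=
  if cell == character then (q.1 + 1, if q.1 + 1 > q.2 then q.1 + 1 else q.2) else (0, q.2)

def pvMaxRun (character : String) (seg : List String) : Int :=
  (seg.foldl (pvRunStep character) (0, 0)).2

-- fold one segment into the running best
def pvSegAcc (character : String) (win_score : Int) (best : Int) (seg : List String) : Int :=
  if (seg.length : Int) ≥ win_score then
    (if pvMaxRun character seg > best then pvMaxRun character seg else best)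
  else best

def check_rows_open_alt (board : List (List String)) (character : String) (win_score : Int) : Int :=
  match board with
  | [] => 0
  | first :: _ =>
    board.foldl (fun best row =>
      let p := (List.range first.length).foldl
        (fun p i => pvSegStep character p (PySem.List.pyGetD row (Int.ofNat i) "")) ([], [])
      (p.1 ++ [p.2]).foldl (pvSegAcc character win_score) best) 0

-- ===== PRECONDITION & SPEC =====
-- Pre_ excludes ragged boards on which some row is shorter than the first row:
-- there Python A raises IndexError (and Python B raises the same way).
def Pre_check_rows_open (board : List (List String)) (character : String) (win_score : Int) : Prop :=
  ∀ row ∈ board, (board.headD []).length ≤ row.length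

instance (board : List (List String)) (character : String) (win_score : Int) : Decidable (Pre_check_rows_open board character win_score) := by unfold Pre_check_rows_open; infer_instance

def pvWitness_check_rows_open : List (List String) × String × Int :=
  ([["x", "-", "o"], ["o", "x", "x"]], "x", 2)

def Spec_check_rows_open (board : List (List String)) (character : String) (win_score : Int) (out : Int) : Prop := out = check_rows_open_alt board character win_score
instance (board : List (List String)) (character : String) (win_score : Int) (out : Int) : Decidable (Spec_check_rows_open board character win_score out) := by unfold Spec_check_rows_open; infer_instance

-- ===== CLAIM (what is proved, stated in full; the proofs are below) =====
def Claim_equal_check_rows_open : Prop := ∀ (board : List (List String)) (character : String) (win_score : Int), Dom_check_rows_open board character win_score → Pre_check_rows_open board character win_score → Spec_check_rows_open board character win_score (check_rows_open board character win_score)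

-- ===== LEMMAS AND PROOFS =====

-- B's per-row computation, written as a recursion on the cell list (proof vehicle)
def pvBRow (character : String) (win_score : Int) (F : Int) (cur : List String) : List String → Int
  | [] => pvSegAcc character win_score F cur
  | c :: cs =>
    if c == character || c == "-" then pvBRow character win_score F (cur ++ [c]) cs
    else pvBRow character win_score (pvSegAcc character win_score F cur) [] cs

theorem pvRunStep_facts (character : String) (cur : List String) :
    0 ≤ (cur.foldl (pvRunStep character) (0, 0)).1 ∧
    (cur.foldl (pvRunStep character) (0, 0)).1 ≤ (cur.foldl (pvRunStep character) (0, 0)).2 := by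
  suffices h : ∀ (l : List String) (q : Int × Int), 0 ≤ q.1 → q.1 ≤ q.2 →
      0 ≤ (l.foldl (pvRunStep character) q).1 ∧
      (l.foldl (pvRunStep character) q).1 ≤ (l.foldl (pvRunStep character) q).2 by
    exact h cur (0, 0) le_rfl le_rfl
  intro l
  induction l with
  | nil => intro q h1 h2; exact ⟨h1, h2⟩
  | cons c cs ih =>
    intro q h1 h2
    simp only [List.foldl_cons]
    apply ih
    · unfold pvRunStep; split <;> simp <;> omega
    · unfold pvRunStep; split <;> simp <;> omega

theorem pvMaxRun_nonneg (character : String) (cur : List String) : 0 ≤ pvMaxRun character cur := by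
  have h := pvRunStep_facts character cur
  unfold pvMaxRun; omega

theorem pvSegAcc_nonneg (character : String) (win_score F : Int) (cur : List String)
    (hF : 0 ≤ F) : 0 ≤ pvSegAcc character win_score F cur := by
  have := pvMaxRun_nonneg character cur
  unfold pvSegAcc; split_ifs <;> omega

-- segAcc written as the single conditional A's final-score update produces
theorem pvSegAcc_eq (character : String) (win_score F : Int) (cur : List String) :
    pvSegAcc character win_score F cur =
      (if ((cur.length : Int)) ≥ win_score ∧ pvMaxRun character cur > F
        then pvMaxRun character cur else F) := by
  unfold pvSegAcc; split_ifs <;> first | rfl | omega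

-- run-fold after appending one cell, by branch
theorem pvRun_concat_char (character : String) (cur : List String) (c : String)
    (hch : (c == character) = true) :
    (cur ++ [c]).foldl (pvRunStep character) (0, 0) =
      ((cur.foldl (pvRunStep character) (0, 0)).1 + 1,
       if (cur.foldl (pvRunStep character) (0, 0)).1 + 1 >
            (cur.foldl (pvRunStep character) (0, 0)).2
        then (cur.foldl (pvRunStep character) (0, 0)).1 + 1
        else (cur.foldl (pvRunStep character) (0, 0)).2) := by
  rw [List.foldl_append]
  simp only [List.foldl_cons, List.foldl_nil]
  unfold pvRunStep
  rw [if_pos hch]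

theorem pvRun_concat_other (character : String) (cur : List String) (c : String)
    (hch : (c == character) = false) :
    (cur ++ [c]).foldl (pvRunStep character) (0, 0) =
      (0, (cur.foldl (pvRunStep character) (0, 0)).2) := by
  rw [List.foldl_append]
  simp only [List.foldl_cons, List.foldl_nil]
  unfold pvRunStep
  rw [if_neg (by simp [hch])]

-- A's step on a character cell, as pure arithmetic on the state
theorem pvStepA_char (character : String) (w : Int) (c : String) (hch : (c == character) = true)
    (r m L F : Int) (hrm : r ≤ m) :
    pvStepA character w (r, m, L, if L ≥ w ∧ m > F then m else F) c =
      (r + 1, (if r + 1 > m then r + 1 else m), L + 1,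
        if L + 1 ≥ w ∧ (if r + 1 > m then r + 1 else m) > F
          then (if r + 1 > m then r + 1 else m) else F) := by
  unfold pvStepA
  rw [if_pos hch]
  simp only [Prod.mk.injEq]
  and_intros <;> first | trivial | (split_ifs <;> omega)

-- A's step on a '-' cell
theorem pvStepA_dash (character : String) (w : Int) (c : String)
    (hch : (c == character) = false) (hd : (c == "-") = true)
    (r m L F : Int) (hm : 0 ≤ m) :
    pvStepA character w (r, m, L, if L ≥ w ∧ m > F then m else F) c =
      (0, m, L + 1, if L + 1 ≥ w ∧ m > F then m else F) := by
  unfold pvStepA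
  rw [if_neg (by simp [hch]), if_pos hd]
  simp only [Prod.mk.injEq]
  and_intros <;> first | trivial | (split_ifs <;> omega)

-- A's step on a blocking cell
theorem pvStepA_block (character : String) (w : Int) (c : String)
    (hch : (c == character) = false) (hd : (c == "-") = false)
    (r m L f : Int) (hf : 0 ≤ f) :
    pvStepA character w (r, m, L, f) c = (0, 0, 0, f) := by
  unfold pvStepA
  rw [if_neg (by simp [hch]), if_neg (by simp [hd])]
  simp only [Prod.mk.injEq]
  and_intros <;> first | trivial | (split_ifs <;> omega)

-- CORE: A's inner fold equals B's per-row recursion, for any prefix state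
theorem pvCore (character : String) (win_score : Int) :
    ∀ (cells : List String) (F : Int) (cur : List String), 0 ≤ F →
    (cells.foldl (pvStepA character win_score)
      ((cur.foldl (pvRunStep character) (0, 0)).1,
       (cur.foldl (pvRunStep character) (0, 0)).2,
       (cur.length : Int),
       pvSegAcc character win_score F cur)).2.2.2
    = pvBRow character win_score F cur cells := by
  intro cells
  induction cells with
  | nil => intro F cur hF; simp [pvBRow]
  | cons c cs ih =>
    intro F cur hF
    have hrun := pvRunStep_facts character cur
    have hmx := pvMaxRun_nonneg character cur
    have hmr : pvMaxRun character cur = (cur.foldl (pvRunStep character) (0, 0)).2 := rfl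
    simp only [List.foldl_cons, pvBRow]
    by_cases hch : (c == character) = true
    · -- character cell: extend current run
      rw [if_pos (by simp [hch])]
      rw [pvSegAcc_eq, hmr, pvStepA_char character win_score c hch _ _ _ F hrun.2]
      have hst : ((cur.foldl (pvRunStep character) (0, 0)).1 + 1,
            (if (cur.foldl (pvRunStep character) (0, 0)).1 + 1 >
                  (cur.foldl (pvRunStep character) (0, 0)).2
              then (cur.foldl (pvRunStep character) (0, 0)).1 + 1
              else (cur.foldl (pvRunStep character) (0, 0)).2),
            ((cur.length : Int)) + 1,
            if ((cur.length : Int)) + 1 ≥ win_score ∧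
                (if (cur.foldl (pvRunStep character) (0, 0)).1 + 1 >
                      (cur.foldl (pvRunStep character) (0, 0)).2
                  then (cur.foldl (pvRunStep character) (0, 0)).1 + 1
                  else (cur.foldl (pvRunStep character) (0, 0)).2) > F
              then (if (cur.foldl (pvRunStep character) (0, 0)).1 + 1 >
                      (cur.foldl (pvRunStep character) (0, 0)).2
                  then (cur.foldl (pvRunStep character) (0, 0)).1 + 1
                  else (cur.foldl (pvRunStep character) (0, 0)).2) else F)
          = (((cur ++ [c]).foldl (pvRunStep character) (0, 0)).1,
             ((cur ++ [c]).foldl (pvRunStep character) (0, 0)).2,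
             ((cur ++ [c]).length : Int),
             pvSegAcc character win_score F (cur ++ [c])) := by
        have hq := pvRun_concat_char character cur c hch
        have hmr' : pvMaxRun character (cur ++ [c]) =
            ((cur ++ [c]).foldl (pvRunStep character) (0, 0)).2 := rfl
        rw [pvSegAcc_eq, hmr', hq]
        simp only [List.length_append, List.length_cons, List.length_nil, Prod.mk.injEq]
        push_cast
        and_intros <;> trivial
      rw [hst]
      exact ih F (cur ++ [c]) hF
    · have hch' : (c == character) = false := by simpa using hch
      by_cases hd : (c == "-") = true
      · -- '-' cell: segment continues, run resets
        rw [if_pos (by simp [hd])]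
        rw [pvSegAcc_eq, hmr, pvStepA_dash character win_score c hch' hd _ _ _ F (by omega)]
        have hst : ((0 : Int), (cur.foldl (pvRunStep character) (0, 0)).2,
              ((cur.length : Int)) + 1,
              if ((cur.length : Int)) + 1 ≥ win_score ∧
                  (cur.foldl (pvRunStep character) (0, 0)).2 > F
                then (cur.foldl (pvRunStep character) (0, 0)).2 else F)
            = (((cur ++ [c]).foldl (pvRunStep character) (0, 0)).1,
               ((cur ++ [c]).foldl (pvRunStep character) (0, 0)).2,
               ((cur ++ [c]).length : Int),
               pvSegAcc character win_score F (cur ++ [c])) := by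
          have hq := pvRun_concat_other character cur c hch'
          have hmr' : pvMaxRun character (cur ++ [c]) =
              ((cur ++ [c]).foldl (pvRunStep character) (0, 0)).2 := rfl
          rw [pvSegAcc_eq, hmr', hq]
          simp only [List.length_append, List.length_cons, List.length_nil, Prod.mk.injEq]
          push_cast
          and_intros <;> trivial
        rw [hst]
        exact ih F (cur ++ [c]) hF
      · -- blocking cell: close the segment
        have hd' : (c == "-") = false := by simpa using hd
        rw [if_neg (by simp [hch', hd'])]
        have hFin0 : 0 ≤ pvSegAcc character win_score F cur :=
          pvSegAcc_nonneg character win_score F cur hF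
        rw [pvStepA_block character win_score c hch' hd' _ _ _ _ hFin0]
        have hst : ((0 : Int), (0 : Int), (0 : Int), pvSegAcc character win_score F cur)
            = ((([] : List String).foldl (pvRunStep character) (0, 0)).1,
               (([] : List String).foldl (pvRunStep character) (0, 0)).2,
               ((([] : List String).length : Int)),
               pvSegAcc character win_score (pvSegAcc character win_score F cur) []) := by
          have h0 : pvMaxRun character ([] : List String) = 0 := rfl
          simp only [List.foldl_nil, List.length_nil, Nat.cast_zero, Prod.mk.injEq]
          rw [pvSegAcc_eq character win_score (pvSegAcc character win_score F cur)
            ([] : List String), h0]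
          and_intros <;> try trivial
          split_ifs with h
          · exact absurd h.2 (not_lt.mpr hFin0)
          · rfl
        rw [hst]
        exact ih (pvSegAcc character win_score F cur) [] hFin0

-- B's segment fold over the two-phase split equals the per-row recursion
theorem pvBfold (character : String) (win_score : Int) :
    ∀ (cells : List String) (closed : List (List String)) (cur : List String) (F : Int),
    (((cells.foldl (pvSegStep character) (closed, cur)).1 ++
        [(cells.foldl (pvSegStep character) (closed, cur)).2]).foldl
        (pvSegAcc character win_score) F)
    = pvBRow character win_score (closed.foldl (pvSegAcc character win_score) F) cur cells := by
  intro cells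
  induction cells with
  | nil =>
    intro closed cur F
    simp [pvBRow, List.foldl_append]
  | cons c cs ih =>
    intro closed cur F
    simp only [List.foldl_cons, pvBRow]
    by_cases hc : (c == character || c == "-") = true
    · rw [show pvSegStep character (closed, cur) c = (closed, cur ++ [c]) by
        unfold pvSegStep; rw [if_pos hc], if_pos hc]
      exact ih closed (cur ++ [c]) F
    · rw [show pvSegStep character (closed, cur) c = (closed ++ [cur], []) by
        unfold pvSegStep; rw [if_neg hc], if_neg hc]
      rw [ih (closed ++ [cur]) [] F]
      rw [List.foldl_append]
      simp

-- pvBRow result stays nonnegative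
theorem pvBRow_nonneg (character : String) (win_score : Int) :
    ∀ (cells cur : List String) (F : Int), 0 ≤ F →
    0 ≤ pvBRow character win_score F cur cells := by
  intro cells
  induction cells with
  | nil =>
    intro cur F hF
    exact pvSegAcc_nonneg character win_score F cur hF
  | cons c cs ih =>
    intro cur F hF
    simp only [pvBRow]
    split_ifs with h
    · exact ih (cur ++ [c]) F hF
    · exact ih [] _ (pvSegAcc_nonneg character win_score F cur hF)

-- the cells a row contributes: indices 0..width-1 read with pyGetD
def pvCells (row : List String) (width : Nat) : List String :=
  (List.range width).map (fun i => PySem.List.pyGetD row (Int.ofNat i) "")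

-- A's inner index fold over a row written as a fold over its cell list
theorem pvA_inner_cells (character : String) (win_score : Int) (row : List String)
    (width : Nat) (st : Int × Int × Int × Int) :
    (PySem.List.pyRange 0 (width : Int) 1).foldl
      (fun s column => pvStepA character win_score s (PySem.List.pyGetD row column ""))
      st
    = (pvCells row width).foldl (pvStepA character win_score) st := by
  rw [PySem.List.pyRange_one 0 (width : Int)]
  simp only [sub_zero, Int.toNat_natCast]
  rw [List.foldl_map]
  unfold pvCells
  rw [List.foldl_map]
  simp only [zero_add, Int.ofNat_eq_natCast]

-- both outer loops, rewritten to fold over the rows with the shared per-row function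
theorem pvMain (board : List (List String)) (character : String) (win_score : Int) :
    check_rows_open board character win_score =
      check_rows_open_alt board character win_score := by
  cases board with
  | nil => rfl
  | cons first rest =>
    unfold check_rows_open check_rows_open_alt
    rw [PySem.List.foldl_pyRange_zero_pyGetD' (first :: rest) ([] : List String)
      (fun final_score row =>
        (((PySem.List.pyRange 0 ((PySem.List.pyGetD (first :: rest) 0 []).length : Int) 1).foldl
          (fun s column => pvStepA character win_score s (PySem.List.pyGetD row column ""))
          (0, 0, 0, final_score)).2.2.2)) 0]
    have hfirst : PySem.List.pyGetD (first :: rest) 0 [] = first := by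
      simp [PySem.List.pyGetD_zero_cons]
    rw [hfirst]
    -- now both sides fold over the same rows; prove per-row equality with 0 ≤ acc invariant
    suffices h : ∀ (rows : List (List String)) (F : Int), 0 ≤ F →
        rows.foldl (fun final_score row =>
          (((PySem.List.pyRange 0 (first.length : Int) 1).foldl
            (fun s column => pvStepA character win_score s (PySem.List.pyGetD row column ""))
            (0, 0, 0, final_score)).2.2.2)) F
        = rows.foldl (fun best row =>
            let p := (List.range first.length).foldl
              (fun p i => pvSegStep character p (PySem.List.pyGetD row (Int.ofNat i) "")) ([], [])
            (p.1 ++ [p.2]).foldl (pvSegAcc character win_score) best) F by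
      exact h (first :: rest) 0 le_rfl
    intro rows
    induction rows with
    | nil => intro F hF; rfl
    | cons r rs ih =>
      intro F hF
      simp only [List.foldl_cons]
      have hrowA : ((PySem.List.pyRange 0 (first.length : Int) 1).foldl
            (fun s column => pvStepA character win_score s (PySem.List.pyGetD r column ""))
            (0, 0, 0, F)).2.2.2
          = pvBRow character win_score F [] (pvCells r first.length) := by
        rw [pvA_inner_cells character win_score r first.length (0, 0, 0, F)]
        have h0 : pvSegAcc character win_score F ([] : List String) = F := by
          rw [pvSegAcc_eq]
          have : pvMaxRun character ([] : List String) = 0 := rfl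
          rw [this]
          split_ifs <;> omega
        have := pvCore character win_score (pvCells r first.length) F [] hF
        simp only [List.foldl_nil, List.length_nil, Nat.cast_zero] at this
        rw [h0] at this
        exact this
      have hrowB : ((((List.range first.length).foldl
              (fun p i => pvSegStep character p (PySem.List.pyGetD r (Int.ofNat i) "")) ([], [])).1 ++
            [((List.range first.length).foldl
              (fun p i => pvSegStep character p (PySem.List.pyGetD r (Int.ofNat i) "")) ([], [])).2]).foldl
            (pvSegAcc character win_score) F)
          = pvBRow character win_score F [] (pvCells r first.length) := by
        have hmap : (List.range first.length).foldl
              (fun p i => pvSegStep character p (PySem.List.pyGetD r (Int.ofNat i) "")) ([], [])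
            = (pvCells r first.length).foldl (pvSegStep character) ([], []) := by
          unfold pvCells
          rw [List.foldl_map]
        rw [hmap]
        have := pvBfold character win_score (pvCells r first.length) [] [] F
        simpa using this
      rw [hrowA, ← hrowB]
      have hnn : 0 ≤ pvBRow character win_score F [] (pvCells r first.length) :=
        pvBRow_nonneg character win_score (pvCells r first.length) [] F hF
      rw [hrowB]
      exact ih _ hnn

-- ===== VERDICT (by name: the statement is the Claim_ definition above) =====
theorem check_rows_open_spec : Claim_equal_check_rows_open := by
  intro board character win_score _ _
  unfold Spec_check_rows_open
  exact pvMain board character win_score
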